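-- pv_equiv track=rewrite | github.com/JRusak/AdventOfCode2021 | src/day08/puzzle16.py | process_example_data
-- ===== SOURCE A (Python) =====
-- def process_example_data(data):
--     a, b = [], []
--     for idx, line in enumerate(data):
--         if idx & 1:
--             b.append(line.strip().split())
--         else:
--             a.append(line[:-3].split())
--     return zip(a, b)
-- ===== SOURCE B (Python) =====
-- def process_example_data(data):
--     a = [line[:-3].split() for line in data[::2]]
--     b = [line.strip().split() for line in data[1::2]]
--     return zip(a, b)
-- ===== Notes on version B (the rewrite author's own statement) =====
-- stated objective: simpler
-- what changed: Replaces the single interleaved enumerate loop with an index-parity branch and two accumulators by two independent comprehensions over the even (data[::2]) and odd (data[1::2]) stride slices, then zips them.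
import Mathlib
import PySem

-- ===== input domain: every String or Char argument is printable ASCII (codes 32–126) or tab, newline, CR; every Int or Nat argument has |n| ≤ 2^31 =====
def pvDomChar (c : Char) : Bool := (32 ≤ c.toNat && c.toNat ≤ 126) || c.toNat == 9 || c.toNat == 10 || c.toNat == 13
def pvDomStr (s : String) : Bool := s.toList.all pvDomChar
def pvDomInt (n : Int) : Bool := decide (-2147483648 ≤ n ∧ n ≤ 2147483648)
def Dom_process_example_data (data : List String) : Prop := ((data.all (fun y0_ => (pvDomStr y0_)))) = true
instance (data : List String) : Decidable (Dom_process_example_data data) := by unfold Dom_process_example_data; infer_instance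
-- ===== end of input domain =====

-- B rewrites A's single interleaved enumerate-loop with an index-parity branch as two
-- independent passes over the even and odd stride slices of the input (objective: simpler).

-- ===== PORT A =====
-- one loop over enumerate(data): even idx → a.append(line[:-3].split()), odd idx → b.append(line.strip().split())
-- 'if idx & 1' ported as idx % 2 == 1 (exact: enumerate indices are ≥ 0, so the low bit is the remainder mod 2)
def process_example_data (data : List String) : List (List String × List String) :=
  let r := (PySem.List.enumerate data 0).foldl
    (fun (st : List (List String) × List (List String)) (p : Int × String) =>
      if PySem.Int.mod p.1 2 == 1 then
        (st.1, st.2 ++ [PySem.Str.split₀ (PySem.Str.strip p.2)])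
      else
        (st.1 ++ [PySem.Str.split₀ (PySem.Str.slice p.2 none (some (-3)))], st.2))
    ([], [])
  r.1.zip r.2

-- ===== PORT B =====
-- a = [line[:-3].split() for line in data[::2]]; b = [line.strip().split() for line in data[1::2]]; zip(a, b)
-- step literal 2 ≠ 0, so slice? always returns some; the .getD [] default is unreachable
def process_example_data_alt (data : List String) : List (List String × List String) :=
  let a := ((PySem.List.slice? data none none 2).getD []).map
    (fun line => PySem.Str.split₀ (PySem.Str.slice line none (some (-3))))
  let b := ((PySem.List.slice? data (some 1) none 2).getD []).map
    (fun line => PySem.Str.split₀ (PySem.Str.strip line))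
  a.zip b

-- ===== PRECONDITION & SPEC =====
def Spec_process_example_data (data : List String) (out : List (List String × List String)) : Prop := out = process_example_data_alt data
instance (data : List String) (out : List (List String × List String)) : Decidable (Spec_process_example_data data out) := by unfold Spec_process_example_data; infer_instance

-- ===== CLAIM (what is proved, stated in full; the proofs are below) =====
def Claim_equal_process_example_data : Prop := ∀ (data : List String), Dom_process_example_data data → Spec_process_example_data data (process_example_data data)

-- ===== LEMMAS AND PROOFS =====

-- elements of xs at even positions
def pvEvens {α : Type} : List α → List α
  | [] => []
  | [x] => [x]
  | x :: _ :: t => x :: pvEvens t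

theorem pvEvens_cons {α : Type} (y : α) (t : List α) :
    pvEvens (y :: t) = y :: pvEvens t.tail := by
  cases t <;> simp [pvEvens]

-- filterMap-over-range characterisation of pvEvens (the shape slice? produces)
theorem fm_pvEvens {α : Type} (xs : List α) :
    List.filterMap (fun k => xs[2 * k]?) (List.range ((xs.length + 1) / 2)) = pvEvens xs := by
  induction xs using pvEvens.induct with
  | case1 => simp [pvEvens]
  | case2 x => simp [pvEvens, List.range_succ]
  | case3 x y t ih =>
    have hc : (((x :: y :: t).length + 1) / 2) = (t.length + 1) / 2 + 1 := by
      simp; omega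
    rw [hc, List.range_succ_eq_map, List.filterMap_cons, List.filterMap_map]
    have : (fun k => (x :: y :: t)[2 * k]?) ∘ (fun i => i + 1) = fun k => t[2 * k]? := by
      funext k
      have h2 : 2 * (k + 1) = 2 * k + 1 + 1 := by omega
      simp [Function.comp, h2]
    rw [this, ih]
    simp [pvEvens]

theorem slice2_even {α : Type} (xs : List α) :
    PySem.List.slice? xs none none 2 = some (pvEvens xs) := by
  rw [← fm_pvEvens]
  simp only [PySem.List.slice?, PySem.List.sliceIndices]
  norm_num
  have hc : (if 0 < xs.length then (((xs.length : Int) + 2 - 1) / 2).toNat else 0)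
      = (xs.length + 1) / 2 := by split_ifs with h <;> omega
  rw [hc]
  apply List.filterMap_congr
  intro k _
  congr 1

theorem slice2_odd {α : Type} (xs : List α) :
    PySem.List.slice? xs (some 1) none 2 = some (pvEvens xs.tail) := by
  cases xs with
  | nil => simp [PySem.List.slice?, PySem.List.sliceIndices, pvEvens]
  | cons x t =>
    rw [show (x :: t).tail = t from rfl, ← fm_pvEvens]
    simp only [PySem.List.slice?, PySem.List.sliceIndices]
    norm_num
    have hc : (if 0 < t.length then (((t.length : Int) + 2 - 1) / 2).toNat else 0)
        = (t.length + 1) / 2 := by split_ifs with h <;> omega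
    rw [hc]
    apply List.filterMap_congr
    intro k _
    have h1 : ((1 : Int) + 2 * (k : Int)).toNat = 2 * k + 1 := by omega
    rw [h1]
    simp

theorem foldA {α : Type} (g1 g2 : String → α) :
    ∀ (xs : List String) (a b : List α) (k : Nat),
      (PySem.List.enumerate xs (2 * (k : Int))).foldl
        (fun st p =>
          if PySem.Int.mod p.1 2 == 1 then (st.1, st.2 ++ [g2 p.2])
          else (st.1 ++ [g1 p.2], st.2)) (a, b)
      = (a ++ (pvEvens xs).map g1, b ++ (pvEvens xs.tail).map g2) := by
  intro xs
  induction xs using pvEvens.induct with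
  | case1 =>
    intro a b k
    simp [PySem.List.enumerate, pvEvens]
  | case2 x =>
    intro a b k
    have hm : PySem.Int.mod (2 * (k : Int)) 2 = 0 := by
      simp only [PySem.Int.mod]; rw [Int.fmod_eq_emod]; omega
    simp only [PySem.List.enumerate, List.foldl_cons, List.foldl_nil, hm]
    simp [pvEvens]
  | case3 x y t ih =>
    intro a b k
    have hm0 : PySem.Int.mod (2 * (k : Int)) 2 = 0 := by
      simp only [PySem.Int.mod]; rw [Int.fmod_eq_emod]; omega
    have hm1 : PySem.Int.mod (2 * (k : Int) + 1) 2 = 1 := by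
      simp only [PySem.Int.mod]; rw [Int.fmod_eq_emod]; omega
    have hstep : 2 * (k : Int) + 1 + 1 = 2 * ((k + 1 : Nat) : Int) := by push_cast; ring
    simp only [PySem.List.enumerate, List.foldl_cons, hm0, hm1,
      show ((0 : Int) == 1) = false from rfl, show ((1 : Int) == 1) = true from rfl,
      Bool.false_eq_true, if_false, if_true]
    rw [hstep, ih (a ++ [g1 x]) (b ++ [g2 y]) (k + 1)]
    rw [show pvEvens (x :: y :: t) = x :: pvEvens t from rfl,
      show (x :: y :: t).tail = y :: t from rfl, pvEvens_cons y t]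
    simp

-- ===== VERDICT (by name: the statement is the Claim_ definition above) =====
theorem process_example_data_spec : Claim_equal_process_example_data := by
  intro data _
  unfold Spec_process_example_data process_example_data process_example_data_alt
  rw [slice2_even, slice2_odd]
  have h := foldA (fun line => PySem.Str.split₀ (PySem.Str.slice line none (some (-3))))
    (fun line => PySem.Str.split₀ (PySem.Str.strip line)) data [] [] 0
  simp only [Nat.cast_zero, mul_zero, List.nil_append] at h
  simp only [Option.getD_some]
  rw [h]
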